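-- pv_equiv track=rewrite | github.com/YaroslavValeev/mywave-ai-team | app/shared/critical_flags.py | infer_flags_from_task
-- ===== SOURCE A (Python) =====
-- CRITICAL_FLAGS = [
--     "prod_deploy",
--     "public_publish",
--     "money_or_pricing",
--     "pii_or_sensitive",
--     "legal_commitment",
-- ]
--
-- def infer_flags_from_task(
--     domain: str,
--     task_type: str,
--     execute_gate: str,
--     plan_or_execute: str,
-- ) -> dict:
--     """Выводит флаги из контекста задачи."""
--     flags = {f: False for f in CRITICAL_FLAGS}
--     if plan_or_execute != "EXECUTE":
--         return flags
--
--     gate_lower = (execute_gate or "").lower()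
--     task_lower = (task_type or "").lower()
--
--     if "prod" in gate_lower or "deploy" in task_lower or task_type == "deploy_prod":
--         flags["prod_deploy"] = True
--     if "publish" in gate_lower or "publish" in task_lower or task_type == "publish_major":
--         flags["public_publish"] = True
--     if "money" in gate_lower or "contract" in gate_lower or "pricing" in task_lower:
--         flags["money_or_pricing"] = True
--     if "pii" in gate_lower or "sensitive" in gate_lower or "pii" in task_lower:
--         flags["pii_or_sensitive"] = True
--     if "legal" in gate_lower or "contract" in gate_lower:
--         flags["legal_commitment"] = True
--
--     return flags
-- ===== SOURCE B (Python) =====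
-- CRITICAL_FLAGS = [
--     "prod_deploy",
--     "public_publish",
--     "money_or_pricing",
--     "pii_or_sensitive",
--     "legal_commitment",
-- ]
--
-- # Inverted keyword -> flags index.  Instead of testing each flag's substrings
-- # separately, B scans each lowercased context string ONCE position by position
-- # with a multi-pattern matcher, collecting the set of flags whose keyword
-- # starts there; the output is built from that triggered set.  (A's exact
-- # task_type equality checks are subsumed by the keyword scan.)
-- GATE_KEYWORDS = {
--     "prod": ("prod_deploy",),
--     "publish": ("public_publish",),
--     "money": ("money_or_pricing",),
--     "contract": ("money_or_pricing", "legal_commitment"),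
--     "pii": ("pii_or_sensitive",),
--     "sensitive": ("pii_or_sensitive",),
--     "legal": ("legal_commitment",),
-- }
-- TASK_KEYWORDS = {
--     "deploy": ("prod_deploy",),
--     "publish": ("public_publish",),
--     "pricing": ("money_or_pricing",),
--     "pii": ("pii_or_sensitive",),
-- }
--
-- def infer_flags_from_task(
--     domain: str,
--     task_type: str,
--     execute_gate: str,
--     plan_or_execute: str,
-- ) -> dict:
--     triggered = set()
--     if plan_or_execute == "EXECUTE":
--         texts = (
--             ((execute_gate or "").lower(), GATE_KEYWORDS),
--             ((task_type or "").lower(), TASK_KEYWORDS),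
--         )
--         for text, table in texts:
--             for i in range(len(text)):
--                 for kw, fs in table.items():
--                     if text.startswith(kw, i):
--                         triggered.update(fs)
--     return {f: f in triggered for f in CRITICAL_FLAGS}
-- ===== Notes on version B (the rewrite author's own statement) =====
-- stated objective: alternative
-- what changed: Replaces A's five per-flag substring tests with an inverted keyword->flags index and a single position-by-position multi-pattern scan of each context string, accumulating a triggered-flag set from which the output dict is built; A's two exact task_type equality checks are subsumed by the keyword scan and dropped.
import Mathlib
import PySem

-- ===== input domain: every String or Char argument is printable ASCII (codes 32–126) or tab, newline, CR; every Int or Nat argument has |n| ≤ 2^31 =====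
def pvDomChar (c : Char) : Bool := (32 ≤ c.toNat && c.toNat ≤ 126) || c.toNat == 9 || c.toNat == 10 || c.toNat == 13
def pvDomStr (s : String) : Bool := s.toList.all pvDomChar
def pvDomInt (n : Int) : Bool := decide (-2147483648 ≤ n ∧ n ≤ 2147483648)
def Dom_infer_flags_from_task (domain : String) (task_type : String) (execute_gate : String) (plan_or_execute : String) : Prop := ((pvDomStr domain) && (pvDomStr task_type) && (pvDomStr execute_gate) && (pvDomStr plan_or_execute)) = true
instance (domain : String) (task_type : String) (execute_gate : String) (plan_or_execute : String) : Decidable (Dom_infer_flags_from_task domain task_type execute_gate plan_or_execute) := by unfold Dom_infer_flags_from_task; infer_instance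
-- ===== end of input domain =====

-- B replaces A's per-flag substring tests by an inverted keyword → flags index and a single
-- position-by-position multi-pattern scan of each context string accumulating a triggered-flag
-- set (A's two exact task_type equality checks are subsumed by the scan); objective: alternative.

-- ===== PORT A =====
def CRITICAL_FLAGS : List String :=
  ["prod_deploy", "public_publish", "money_or_pricing", "pii_or_sensitive", "legal_commitment"]

def infer_flags_from_task (domain : String) (task_type : String) (execute_gate : String) (plan_or_execute : String) : List (String × Bool) :=
  let flags : PySem.Dict String Bool :=
    CRITICAL_FLAGS.foldl (fun d f => d.insert f false) PySem.Dict.empty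
  if plan_or_execute ≠ "EXECUTE" then flags.items
  else
    let gate_lower := PySem.Str.lower (if execute_gate = "" then "" else execute_gate)
    let task_lower := PySem.Str.lower (if task_type = "" then "" else task_type)
    let flags := if PySem.Str.isIn "prod" gate_lower || PySem.Str.isIn "deploy" task_lower || task_type == "deploy_prod"
                 then flags.insert "prod_deploy" true else flags
    let flags := if PySem.Str.isIn "publish" gate_lower || PySem.Str.isIn "publish" task_lower || task_type == "publish_major"
                 then flags.insert "public_publish" true else flags
    let flags := if PySem.Str.isIn "money" gate_lower || PySem.Str.isIn "contract" gate_lower || PySem.Str.isIn "pricing" task_lower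
                 then flags.insert "money_or_pricing" true else flags
    let flags := if PySem.Str.isIn "pii" gate_lower || PySem.Str.isIn "sensitive" gate_lower || PySem.Str.isIn "pii" task_lower
                 then flags.insert "pii_or_sensitive" true else flags
    let flags := if PySem.Str.isIn "legal" gate_lower || PySem.Str.isIn "contract" gate_lower
                 then flags.insert "legal_commitment" true else flags
    flags.items

-- ===== PORT B =====
-- inverted index: keyword ↦ flags it triggers, per context string
def GATE_KEYWORDS : List (String × List String) :=
  [ ("prod",      ["prod_deploy"]),
    ("publish",   ["public_publish"]),
    ("money",     ["money_or_pricing"]),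
    ("contract",  ["money_or_pricing", "legal_commitment"]),
    ("pii",       ["pii_or_sensitive"]),
    ("sensitive", ["pii_or_sensitive"]),
    ("legal",     ["legal_commitment"]) ]

def TASK_KEYWORDS : List (String × List String) :=
  [ ("deploy",  ["prod_deploy"]),
    ("publish", ["public_publish"]),
    ("pricing", ["money_or_pricing"]),
    ("pii",     ["pii_or_sensitive"]) ]

-- 'for i in range(len(text)): for kw, fs in table.items(): if text.startswith(kw, i): triggered.update(fs)'
def scanText (text : List Char) (table : List (String × List String)) (acc : PySem.Set String) : PySem.Set String :=
  (List.range text.length).foldl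
    (fun a i => table.foldl
      (fun a p => if PySem.Chars.startswith (text.drop i) p.1.toList then PySem.Set.update a p.2 else a) a)
    acc

def infer_flags_from_task_alt (domain : String) (task_type : String) (execute_gate : String) (plan_or_execute : String) : List (String × Bool) :=
  let triggered : PySem.Set String :=
    if plan_or_execute = "EXECUTE" then
      let gate := (PySem.Str.lower (if execute_gate = "" then "" else execute_gate)).toList
      let task := (PySem.Str.lower (if task_type = "" then "" else task_type)).toList
      scanText task TASK_KEYWORDS (scanText gate GATE_KEYWORDS PySem.Set.empty)
    else PySem.Set.empty
  CRITICAL_FLAGS.map (fun f => (f, PySem.Set.contains triggered f))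

-- ===== PRECONDITION & SPEC =====
def Spec_infer_flags_from_task (domain : String) (task_type : String) (execute_gate : String) (plan_or_execute : String) (out : List (String × Bool)) : Prop := out = infer_flags_from_task_alt domain task_type execute_gate plan_or_execute
instance (domain : String) (task_type : String) (execute_gate : String) (plan_or_execute : String) (out : List (String × Bool)) : Decidable (Spec_infer_flags_from_task domain task_type execute_gate plan_or_execute out) := by unfold Spec_infer_flags_from_task; infer_instance

-- ===== CLAIM =====
def Claim_equal_infer_flags_from_task : Prop := ∀ (domain : String) (task_type : String) (execute_gate : String) (plan_or_execute : String), Dom_infer_flags_from_task domain task_type execute_gate plan_or_execute → Spec_infer_flags_from_task domain task_type execute_gate plan_or_execute (infer_flags_from_task domain task_type execute_gate plan_or_execute)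

-- ===== LEMMAS AND PROOFS =====

-- `s or ""` in Python returns s itself for strings.
theorem if_empty_self (s : String) : (if s = "" then "" else s) = s := by
  split <;> simp_all

-- Shape of A's dict after the five conditional inserts, for arbitrary conditions.
theorem dict_shape (c1 c2 c3 c4 c5 : Bool) :
    (let d0 : PySem.Dict String Bool :=
        CRITICAL_FLAGS.foldl (fun d f => d.insert f false) PySem.Dict.empty
     let d1 := if c1 then d0.insert "prod_deploy" true else d0
     let d2 := if c2 then d1.insert "public_publish" true else d1
     let d3 := if c3 then d2.insert "money_or_pricing" true else d2
     let d4 := if c4 then d3.insert "pii_or_sensitive" true else d3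
     let d5 := if c5 then d4.insert "legal_commitment" true else d4
     d5.items) =
    [("prod_deploy", c1), ("public_publish", c2), ("money_or_pricing", c3),
     ("pii_or_sensitive", c4), ("legal_commitment", c5)] := by
  cases c1 <;> cases c2 <;> cases c3 <;> cases c4 <;> cases c5 <;> decide

-- A's exact-equality checks are subsumed by its substring checks.
theorem deploy_subsumed (t : String) :
    (PySem.Str.isIn "deploy" (PySem.Str.lower t) || (t == "deploy_prod"))
      = PySem.Str.isIn "deploy" (PySem.Str.lower t) := by
  by_cases h : t = "deploy_prod"
  · subst h; decide
  · simp [h]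

theorem publish_subsumed (t : String) :
    (PySem.Str.isIn "publish" (PySem.Str.lower t) || (t == "publish_major"))
      = PySem.Str.isIn "publish" (PySem.Str.lower t) := by
  by_cases h : t = "publish_major"
  · subst h; decide
  · simp [h]

-- membership in the inner per-position fold over the keyword table
theorem mem_table_fold (text : List Char) (i : Nat) (table : List (String × List String))
    (acc : PySem.Set String) (x : String) :
    x ∈ table.foldl
      (fun a p => if PySem.Chars.startswith (text.drop i) p.1.toList then PySem.Set.update a p.2 else a) acc
    ↔ x ∈ acc ∨ ∃ p ∈ table, PySem.Chars.startswith (text.drop i) p.1.toList = true ∧ x ∈ p.2 := by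
  induction table generalizing acc with
  | nil => simp
  | cons q qs ih =>
    rw [List.foldl_cons]
    by_cases h : PySem.Chars.startswith (text.drop i) q.1.toList = true
    · rw [if_pos h, ih, List.exists_mem_cons_iff]
      simp only [PySem.Set.mem_update, h, true_and]
      tauto
    · rw [if_neg h, ih, List.exists_mem_cons_iff]
      tauto

-- membership in the outer fold over positions
theorem mem_range_fold (text : List Char) (table : List (String × List String)) (n : Nat)
    (acc : PySem.Set String) (x : String) :
    x ∈ (List.range n).foldl
      (fun a i => table.foldl
        (fun a p => if PySem.Chars.startswith (text.drop i) p.1.toList then PySem.Set.update a p.2 else a) a) acc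
    ↔ x ∈ acc ∨ ∃ i < n, ∃ p ∈ table, PySem.Chars.startswith (text.drop i) p.1.toList = true ∧ x ∈ p.2 := by
  induction n generalizing acc with
  | zero => simp
  | succ m ih =>
    rw [List.range_succ, List.foldl_append, List.foldl_cons, List.foldl_nil, mem_table_fold, ih]
    constructor
    · rintro ((hx | ⟨i, hi, hp⟩) | ⟨p, hp, hs, hxp⟩)
      · exact Or.inl hx
      · exact Or.inr ⟨i, Nat.lt_succ_of_lt hi, hp⟩
      · exact Or.inr ⟨m, Nat.lt_succ_self m, p, hp, hs, hxp⟩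
    · rintro (hx | ⟨i, hi, p, hp, hs, hxp⟩)
      · exact Or.inl (Or.inl hx)
      · rcases Nat.lt_succ_iff_lt_or_eq.1 hi with hlt | rfl
        · exact Or.inl (Or.inr ⟨i, hlt, p, hp, hs, hxp⟩)
        · exact Or.inr ⟨p, hp, hs, hxp⟩

-- a nonempty pattern occurs at some scanned position iff it is a substring
theorem occurs_iff_isIn (sub text : List Char) (h : sub ≠ []) :
    (∃ i < text.length, PySem.Chars.startswith (text.drop i) sub = true)
      ↔ PySem.Chars.isIn sub text = true := by
  rw [← PySem.Chars.exists_prefix_drop_iff_isIn]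
  constructor
  · rintro ⟨i, _, hs⟩
    exact ⟨i, (PySem.Chars.startswith_iff _ _).1 hs⟩
  · rintro ⟨j, hp⟩
    by_cases hj : j < text.length
    · exact ⟨j, hj, (PySem.Chars.startswith_iff _ _).2 hp⟩
    · exfalso
      rw [List.drop_eq_nil_of_le (Nat.le_of_not_lt hj)] at hp
      exact h (List.prefix_nil.1 hp)

-- membership in a full scan, for tables whose keywords are all nonempty
theorem mem_scanText (text : List Char) (table : List (String × List String))
    (acc : PySem.Set String) (x : String)
    (htable : ∀ p ∈ table, p.1.toList ≠ []) :
    x ∈ scanText text table acc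
      ↔ x ∈ acc ∨ ∃ p ∈ table, x ∈ p.2 ∧ PySem.Chars.isIn p.1.toList text = true := by
  unfold scanText
  rw [mem_range_fold]
  apply or_congr_right
  constructor
  · rintro ⟨i, hi, p, hp, hs, hxp⟩
    exact ⟨p, hp, hxp, (occurs_iff_isIn _ _ (htable p hp)).1 ⟨i, hi, hs⟩⟩
  · rintro ⟨p, hp, hxp, hin⟩
    obtain ⟨i, hi, hs⟩ := (occurs_iff_isIn _ _ (htable p hp)).2 hin
    exact ⟨i, hi, p, hp, hs, hxp⟩

-- membership in B's triggered set, both tables unfolded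
theorem mem_triggered (G T : List Char) (x : String) :
    x ∈ scanText T TASK_KEYWORDS (scanText G GATE_KEYWORDS PySem.Set.empty)
      ↔ (∃ p ∈ GATE_KEYWORDS, x ∈ p.2 ∧ PySem.Chars.isIn p.1.toList G = true)
        ∨ (∃ p ∈ TASK_KEYWORDS, x ∈ p.2 ∧ PySem.Chars.isIn p.1.toList T = true) := by
  rw [mem_scanText _ _ _ _ (by decide), mem_scanText _ _ _ _ (by decide)]
  simp [PySem.Set.empty]

-- B's contains equals A's boolean condition, one lemma per flag
theorem contains_eq_of_iff {s : PySem.Set String} {x : String} {b : Bool}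
    (h : x ∈ s ↔ b = true) : PySem.Set.contains s x = b := by
  rw [Bool.eq_iff_iff, PySem.Set.contains_iff, h]

-- ===== VERDICT =====
theorem infer_flags_from_task_spec : Claim_equal_infer_flags_from_task := by
  intro domain task_type execute_gate plan_or_execute _
  unfold Spec_infer_flags_from_task infer_flags_from_task infer_flags_from_task_alt
  by_cases hp : plan_or_execute = "EXECUTE"
  · simp only [hp, ne_eq, not_true_eq_false, if_false, if_true, if_empty_self, dict_shape]
    rw [Bool.or_assoc, deploy_subsumed, Bool.or_assoc, publish_subsumed]
    simp only [CRITICAL_FLAGS, List.map]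
    refine congrArg₂ _ (congrArg _ ?_) (congrArg₂ _ (congrArg _ ?_) (congrArg₂ _ (congrArg _ ?_)
      (congrArg₂ _ (congrArg _ ?_) (congrArg₂ _ (congrArg _ ?_) rfl)))) <;>
    · refine (contains_eq_of_iff ?_).symm
      rw [mem_triggered]
      simp [GATE_KEYWORDS, TASK_KEYWORDS, PySem.Str.isIn] <;> tauto
  · simp only [ne_eq, hp, not_false_eq_true, if_true, if_false]
    decide
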